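-- pv_equiv track=rewrite | github.com/dcross23/AoC2020 | Day6/p6.py | countAllYesResponses
-- ===== SOURCE A (Python) =====
-- def countAllYesResponses(group):
--     questionsAllYes = ''
--
--     for car in group[0]:
--         carIsInPersonResp = True
--         for person in group:
--             if car not in person:
--                 carIsInPersonResp = False
--                 break
--
--         if carIsInPersonResp and car not in questionsAllYes:
--             questionsAllYes += car
--
--     return len(questionsAllYes)
-- ===== SOURCE B (Python) =====
-- def countAllYesResponses(group):
--     # Intersection of per-person answer sets; group[0] first so an empty
--     # group raises IndexError just like the original.
--     common = set(group[0])
--     for person in group[1:]: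
--         common &= set(person)
--     return len(common)
-- ===== Notes on version B (the rewrite author's own statement) =====
-- stated objective: simpler
-- what changed: Replaces the nested char-by-char rescan with manual string dedup by one pass of set intersections over per-person character sets.
import Mathlib
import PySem

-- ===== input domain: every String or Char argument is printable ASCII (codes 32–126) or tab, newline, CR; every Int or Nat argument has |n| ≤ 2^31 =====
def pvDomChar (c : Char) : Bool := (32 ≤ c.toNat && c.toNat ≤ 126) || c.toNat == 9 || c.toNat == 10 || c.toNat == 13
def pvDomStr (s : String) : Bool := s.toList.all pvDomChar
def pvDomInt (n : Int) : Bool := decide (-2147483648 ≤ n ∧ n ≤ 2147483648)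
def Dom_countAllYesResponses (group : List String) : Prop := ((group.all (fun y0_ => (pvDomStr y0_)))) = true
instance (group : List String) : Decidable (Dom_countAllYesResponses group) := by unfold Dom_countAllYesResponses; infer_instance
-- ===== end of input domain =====

-- ===== PORT A =====
-- B replaces A's nested rescan of group[0] with manual dedup by per-person set intersections (simpler).
-- Pre_ excludes only the empty group, on which both Pythons raise IndexError (group[0]).
def countAllYesResponses (group : List String) : Int :=
  match PySem.List.pyGet? group 0 with
  | none => 0      -- Python raises IndexError here; excluded by Pre_
  | some s0 =>
    let questionsAllYes := s0.toList.foldl (fun qs car =>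
      let carIsInPersonResp := group.all (fun person => person.toList.contains car)
      if carIsInPersonResp && !qs.contains car then qs ++ [car] else qs) []
    (questionsAllYes.length : Int)

-- ===== PORT B =====
def countAllYesResponses_alt (group : List String) : Int :=
  match PySem.List.pyGet? group 0 with
  | none => 0      -- Python raises IndexError here; excluded by Pre_
  | some s0 =>
    let common := (group.drop 1).foldl
      (fun acc person => PySem.Set.inter acc (PySem.Set.ofList person.toList))
      (PySem.Set.ofList s0.toList)
    PySem.Set.len common

-- ===== PRECONDITION & SPEC =====
-- Pre_ excludes exactly the empty list, on which A raises IndexError (group[0]).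
def Pre_countAllYesResponses (group : List String) : Prop := group ≠ []
instance (group : List String) : Decidable (Pre_countAllYesResponses group) := by
  unfold Pre_countAllYesResponses; infer_instance
def pvWitness_countAllYesResponses : List String := ["abc", "cab"]
def Spec_countAllYesResponses (group : List String) (out : Int) : Prop := out = countAllYesResponses_alt group
instance (group : List String) (out : Int) : Decidable (Spec_countAllYesResponses group out) := by unfold Spec_countAllYesResponses; infer_instance

-- ===== CLAIM (what is proved, stated in full; the proofs are below) =====
def Claim_equal_countAllYesResponses : Prop := ∀ (group : List String), Dom_countAllYesResponses group → Pre_countAllYesResponses group → Spec_countAllYesResponses group (countAllYesResponses group)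

-- ===== LEMMAS AND PROOFS =====

-- A's dedup-while-filtering fold is "build the dedup, then filter": the running string
-- (restricted by q) equals the filtered running set.
theorem foldA_eq_filter_ofList (q : Char → Bool) (l : List Char) (A : List Char) :
    l.foldl (fun qs car => if q car && !qs.contains car then qs ++ [car] else qs) (A.filter q)
      = (l.foldl PySem.Set.add A).filter q := by
  induction l generalizing A with
  | nil => rfl
  | cons c l ih =>
    have step : (if q c && !(A.filter q).contains c then A.filter q ++ [c] else A.filter q)
        = (PySem.Set.add A c).filter q := by
      have hmem : (A.filter q).contains c = (q c && A.contains c) := by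
        by_cases h : c ∈ A <;> by_cases hq : q c = true <;>
          simp_all [List.mem_filter]
      show _ = (if A.contains c then A else A ++ [c]).filter q
      rw [hmem]
      cases hq : q c <;> cases hA : A.contains c <;>
        simp [hq, List.filter_append]
    simp only [List.foldl_cons]
    rw [step]
    exact ih (PySem.Set.add A c)

-- B's chain of intersections is one filter by "in every remaining person".
theorem foldB_eq_filter (rest : List String) (base : List Char) :
    rest.foldl (fun acc person => PySem.Set.inter acc (PySem.Set.ofList person.toList)) base
      = base.filter (fun c => rest.all (fun person => person.toList.contains c)) := by
  induction rest generalizing base with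
  | nil => simp
  | cons p rest ih =>
    rw [List.foldl_cons, ih]
    show (base.filter fun c => (PySem.Set.ofList p.toList).contains c).filter _ = _
    rw [List.filter_filter]
    refine List.filter_congr (fun c _ => ?_)
    simp [PySem.Set.mem_ofList, Bool.and_comm]

-- ===== VERDICT (by name: the statement is the Claim_ definition above) =====
theorem countAllYesResponses_spec : Claim_equal_countAllYesResponses := by
  intro group _ hpre
  unfold Spec_countAllYesResponses countAllYesResponses countAllYesResponses_alt
  obtain ⟨s0, rest, rfl⟩ : ∃ s0 rest, group = s0 :: rest := by
    cases group with
    | nil => exact absurd rfl hpre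
    | cons a l => exact ⟨a, l, rfl⟩
  have hget : PySem.List.pyGet? (s0 :: rest) 0 = some s0 := by
    simp [PySem.List.pyGet?, PySem.List.pyIdx?]
  rw [hget]
  simp only [List.drop_one, List.tail_cons]
  have hA := foldA_eq_filter_ofList
    (fun car => (s0 :: rest).all (fun person => person.toList.contains car)) s0.toList []
  have hB := foldB_eq_filter rest (PySem.Set.ofList s0.toList)
  simp only [List.filter_nil] at hA
  show ((s0.toList.foldl _ []).length : Int) = PySem.Set.len _
  rw [hA, hB]
  show ((PySem.Set.ofList s0.toList).filter _).length = (((PySem.Set.ofList s0.toList).filter _).length : Int)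
  congr 2
  refine List.filter_congr (fun c hc => ?_)
  have hc0 : s0.toList.contains c = true := by
    rw [List.contains_iff_mem]
    exact (PySem.Set.mem_ofList s0.toList c).mp hc
  simp only [List.all_cons, hc0, Bool.true_and]
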